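-- pv_equiv track=rewrite | github.com/AppalachiaInteractive/com.appalachia.python.appapy | appapy/templating/utils.py | commit_hash
-- ===== SOURCE A (Python) =====
-- def commit_hash(parameter: str) -> bool:
--     if len(parameter) != 40:
--         return False
--     chars = {
--         "0",
--         "1",
--         "2",
--         "3",
--         "4",
--         "5",
--         "6",
--         "7",
--         "8",
--         "9",
--         "0",
--         "a",
--         "b",
--         "c",
--         "d",
--         "e",
--         "f",
--         "A",
--         "B",
--         "C",
--         "D",
--         "E",
--         "F",
--     }
--     for char in parameter:
--         if char not in chars:
--             return False
--
--     return True
-- ===== SOURCE B (Python) =====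
-- def commit_hash(parameter: str) -> bool:
--     # Recursive descent: consume one character at a time with a countdown from 40,
--     # fusing the length check and the hex test (range comparisons, no set).
--     def go(chars, remaining):
--         if not chars:
--             return remaining == 0
--         c = chars[0]
--         return (remaining > 0
--                 and ('0' <= c <= '9' or 'a' <= c <= 'f' or 'A' <= c <= 'F')
--                 and go(chars[1:], remaining - 1))
--     return go(parameter, 40)
-- ===== Notes on version B (the rewrite author's own statement) =====
-- stated objective: alternative
-- what changed: Replaces the upfront length test plus early-return loop over a 22-element literal character set with a single recursive descent that consumes one character at a time against a countdown from 40, deciding hex-ness by three range comparisons, so length and charset are verified in one fused pass with no set at all.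
import Mathlib
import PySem

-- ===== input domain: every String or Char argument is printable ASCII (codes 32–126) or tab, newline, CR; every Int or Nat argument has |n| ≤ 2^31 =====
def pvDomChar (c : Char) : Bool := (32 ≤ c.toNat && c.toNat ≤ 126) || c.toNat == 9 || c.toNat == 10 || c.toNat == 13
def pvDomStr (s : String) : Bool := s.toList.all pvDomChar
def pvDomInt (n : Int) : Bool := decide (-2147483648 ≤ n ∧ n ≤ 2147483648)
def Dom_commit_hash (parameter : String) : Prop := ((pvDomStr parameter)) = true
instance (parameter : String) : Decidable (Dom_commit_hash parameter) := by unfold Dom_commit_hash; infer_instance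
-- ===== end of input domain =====

-- B validates the 40-char hex hash by one fused recursive pass (countdown from 40 +
-- three range comparisons per char) instead of A's length guard and loop over a
-- literal character set (objective: alternative).

-- ===== PORT A =====
-- the Python set literal `chars` (the duplicate "0" collapses, as in Python)
def pvCharsA : PySem.Set Char :=
  PySem.Set.ofList ['0','1','2','3','4','5','6','7','8','9','0','a','b','c','d','e','f',
                    'A','B','C','D','E','F']

-- `for char in parameter: if char not in chars: return False` / `return True`
def pvLoopA : List Char → Bool
  | [] => true
  | c :: rest => if (PySem.Set.contains pvCharsA c) = false then false else pvLoopA rest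

def commit_hash (parameter : String) : Bool :=
  if PySem.Str.len parameter ≠ 40 then false
  else pvLoopA parameter.toList

-- ===== PORT B =====
-- `'0' <= c <= '9' or 'a' <= c <= 'f' or 'A' <= c <= 'F'`
def pvHexB (c : Char) : Bool :=
  (decide ('0' ≤ c) && decide (c ≤ '9')) ||
  (decide ('a' ≤ c) && decide (c ≤ 'f')) ||
  (decide ('A' ≤ c) && decide (c ≤ 'F'))

-- `go(chars, remaining)` of Source B (chars[1:] = structural tail)
def pvGoB : List Char → Int → Bool
  | [], remaining => remaining == 0
  | c :: rest, remaining => decide (remaining > 0) && pvHexB c && pvGoB rest (remaining - 1)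

def commit_hash_alt (parameter : String) : Bool :=
  pvGoB parameter.toList 40

-- ===== PRECONDITION & SPEC =====
def Spec_commit_hash (parameter : String) (out : Bool) : Prop := out = commit_hash_alt parameter
instance (parameter : String) (out : Bool) : Decidable (Spec_commit_hash parameter out) := by unfold Spec_commit_hash; infer_instance

-- ===== CLAIM (what is proved, stated in full; the proofs are below) =====
def Claim_equal_commit_hash : Prop := ∀ (parameter : String), Dom_commit_hash parameter → Spec_commit_hash parameter (commit_hash parameter)

-- ===== LEMMAS AND PROOFS =====

-- per-character key fact over every character the domain admits (codes < 128)
set_option maxRecDepth 4000 in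
theorem pv_charkey : ∀ n < 128,
    PySem.Set.contains pvCharsA (Char.ofNat n) = pvHexB (Char.ofNat n) := by
  decide

-- B's recursion computes "length = remaining and every char is hex"
theorem pv_goB_eq (xs : List Char) (r : Int) :
    pvGoB xs r = (decide ((xs.length : Int) = r) && xs.all pvHexB) := by
  induction xs generalizing r with
  | nil =>
    simp only [pvGoB, List.length_nil, Nat.cast_zero]
    by_cases h : r = 0
    · simp [h]
    · simp [h, Ne.symm h]
  | cons c rest ih =>
    simp only [pvGoB, ih, List.all_cons, List.length_cons]
    by_cases h : ((rest.length : Int) + 1 = r)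
    · have h1 : (0:Int) < r := by omega
      have h2 : (rest.length : Int) = r - 1 := by omega
      push_cast
      simp only [h1, h2, decide_true, Bool.true_and]
      cases pvHexB c <;> simp [Bool.and_comm]
    · have h2 : ¬ ((rest.length : Int) = r - 1) := by omega
      push_cast
      simp [h, h2]

theorem pv_loopA_eq_all (xs : List Char) :
    pvLoopA xs = xs.all (fun c => PySem.Set.contains pvCharsA c) := by
  induction xs with
  | nil => rfl
  | cons c rest ih =>
    simp only [pvLoopA, List.all_cons, ih]
    cases h : PySem.Set.contains pvCharsA c <;> simp

-- ===== VERDICT (by name: the statement is the Claim_ definition above) =====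
theorem commit_hash_spec : Claim_equal_commit_hash := by
  intro parameter hdom
  have hall : parameter.toList.all (fun c => PySem.Set.contains pvCharsA c)
      = parameter.toList.all pvHexB := by
    rw [Bool.eq_iff_iff, List.all_eq_true, List.all_eq_true]
    apply forall₂_congr
    intro c hc
    have hd : pvDomChar c = true := by
      unfold Dom_commit_hash pvDomStr at hdom
      rw [List.all_eq_true] at hdom
      exact hdom c hc
    have hn : c.toNat < 128 := by
      simp only [pvDomChar, Bool.or_eq_true, Bool.and_eq_true, decide_eq_true_eq,
        beq_iff_eq] at hd
      omega
    have hk := pv_charkey c.toNat hn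
    rw [Char.ofNat_toNat] at hk
    rw [hk]
  unfold Spec_commit_hash commit_hash commit_hash_alt
  rw [pv_goB_eq, pv_loopA_eq_all, hall]
  by_cases hlen : ((parameter.toList.length : Int) = 40)
  · rw [if_neg (by simpa using hlen), decide_eq_true hlen, Bool.true_and]
  · rw [if_pos (by simpa using hlen), decide_eq_false hlen, Bool.false_and]
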